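-- pv_equiv track=rewrite | github.com/jazc202/NIU-CPE-Projects | python-ds-practice/fs_3_three_odd_numbers/three_odd_numbers.py | three_odd_numbers
-- ===== SOURCE A (Python) =====
-- def three_odd_numbers(nums):
--     """Is the sum of any 3 sequential numbers odd?"
--
--         >>> three_odd_numbers([1, 2, 3, 4, 5])
--         True
--
--         >>> three_odd_numbers([0, -2, 4, 1, 9, 12, 4, 1, 0])
--         True
--
--         >>> three_odd_numbers([5, 2, 1])
--         False
--
--         >>> three_odd_numbers([1, 2, 3, 3, 2])
--         False
--     """
--
--     sums = []
--     for i in range(len(nums)):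
--         seq = nums[i:i+3]
--         if len(seq) == 3:
--             sums.append(sum(seq))
--
--     odds = [True if x % 2 != 0 else False for x in sums]
--
--     if any(odds):
--         return True
--     else:
--         return False
-- ===== SOURCE B (Python) =====
-- def three_odd_numbers(nums):
--     """Is the sum of any 3 sequential numbers odd?"""
--     prefix = [0]
--     for x in nums:
--         prefix.append((prefix[-1] + x) % 2)
--     for i in range(len(nums) - 2):
--         if prefix[i] != prefix[i + 3]:
--             return True
--     return False
-- ===== Notes on version B (the rewrite author's own statement) =====
-- stated objective: faster
-- what changed: Replaces A's per-window slice-and-resum pipeline (slice sums list, parity list, any) with a cumulative parity prefix table built in one pass, answering each 3-window in O(1) by comparing prefix[i] with prefix[i+3] and short-circuiting on the first odd window.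
import Mathlib
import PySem

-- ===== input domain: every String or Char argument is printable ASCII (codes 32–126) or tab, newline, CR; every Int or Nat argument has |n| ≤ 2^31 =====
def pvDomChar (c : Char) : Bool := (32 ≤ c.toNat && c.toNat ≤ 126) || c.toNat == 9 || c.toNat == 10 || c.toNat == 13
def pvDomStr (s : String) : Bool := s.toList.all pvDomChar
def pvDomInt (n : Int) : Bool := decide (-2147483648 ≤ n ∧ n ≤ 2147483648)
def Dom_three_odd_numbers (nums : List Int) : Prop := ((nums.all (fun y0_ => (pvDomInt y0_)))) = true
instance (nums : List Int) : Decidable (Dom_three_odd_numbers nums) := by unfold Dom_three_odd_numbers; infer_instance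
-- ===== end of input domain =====

-- B replaces A's per-window slice-and-resum pipeline with a cumulative parity prefix
-- table queried per window in O(1); objective: alternative algorithm, same cost class.

-- ===== PORT A =====
-- literal transliteration of A: index loop collecting 3-slices' sums, then a parity list, then any()
def three_odd_numbers (nums : List Int) : Bool :=
  let sums := (PySem.List.pyRange 0 (nums.length : Int) 1).foldl
    (fun acc i =>
      let seq := PySem.List.slice nums (some i) (some (i + 3))
      if seq.length = 3 then acc ++ [seq.sum] else acc) []
  let odds := sums.map (fun x => if PySem.Int.mod x 2 ≠ 0 then true else false)
  if odds.any id then true else false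

-- ===== PORT B =====
-- literal transliteration of B: build prefix parity table, then scan 3-windows via the table
-- (the early-returning for-loop is the short-circuiting any over the same range)
def three_odd_numbers_alt (nums : List Int) : Bool :=
  let pre := nums.foldl
    (fun acc x => acc ++ [PySem.Int.mod (PySem.List.pyGetD acc (-1) 0 + x) 2]) [0]
  (PySem.List.pyRange 0 ((nums.length : Int) - 2) 1).any
    (fun i => decide (PySem.List.pyGetD pre i 0 ≠ PySem.List.pyGetD pre (i + 3) 0))

-- ===== PRECONDITION & SPEC =====
def Spec_three_odd_numbers (nums : List Int) (out : Bool) : Prop := out = three_odd_numbers_alt nums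
instance (nums : List Int) (out : Bool) : Decidable (Spec_three_odd_numbers nums out) := by unfold Spec_three_odd_numbers; infer_instance

-- ===== CLAIM (what is proved, stated in full; the proofs are below) =====
def Claim_equal_three_odd_numbers : Prop := ∀ (nums : List Int), Dom_three_odd_numbers nums → Spec_three_odd_numbers nums (three_odd_numbers nums)

-- ===== LEMMAS AND PROOFS =====

-- the window test A applies at index i, written over Nat indices
def pvWin (nums : List Int) (i : Nat) : Bool :=
  decide (((nums.drop i).take 3).length = 3) &&
    decide (PySem.Int.mod ((nums.drop i).take 3).sum 2 ≠ 0)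

-- parity of the sum of the first k elements
def pvG (nums : List Int) (k : Nat) : Int := PySem.Int.mod ((nums.take k).sum) 2

lemma pvSlice_eq (nums : List Int) (i : Nat) :
    PySem.List.slice nums (some (i : Int)) (some ((i : Int) + 3)) = (nums.drop i).take 3 := by
  rw [PySem.List.slice_toNat nums (by positivity) (by positivity)]
  have h1 : ((i : Int)).toNat = i := by omega
  have h2 : (((i : Int) + 3)).toNat = i + 3 := by omega
  rw [h1, h2]
  congr 1
  omega

-- A equals an any() of the window test over the index range
lemma pvA_char (nums : List Int) :
    three_odd_numbers nums = (List.range nums.length).any (pvWin nums) := by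
  simp only [three_odd_numbers]
  have hf : (fun (acc : List Int) (i : Int) =>
      if (PySem.List.slice nums (some i) (some (i + 3))).length = 3 then
        acc ++ [(PySem.List.slice nums (some i) (some (i + 3))).sum] else acc)
    = (fun acc i =>
      if (fun j => decide ((PySem.List.slice nums (some j) (some (j + 3))).length = 3)) i = true then
        acc ++ [(fun j => (PySem.List.slice nums (some j) (some (j + 3))).sum) i] else acc) := by
    funext acc i
    by_cases h : (PySem.List.slice nums (some i) (some (i + 3))).length = 3 <;> simp [h]
  rw [hf, PySem.List.foldl_append_if, PySem.List.pyRange_one]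
  have hb : ∀ b : Bool, (if b = true then true else false) = b := by decide
  simp only [List.nil_append, List.filter_map, List.map_map, List.any_map, List.any_filter,
    Int.sub_zero, Int.toNat_natCast, hb]
  apply List.any_congr rfl
  intro i
  simp only [Function.comp_apply, id_eq, zero_add, pvWin, pvSlice_eq]
  by_cases hl : ((nums.drop i).take 3).length = 3 <;>
    by_cases hm : PySem.Int.mod ((nums.drop i).take 3).sum 2 ≠ 0 <;> simp [hl]

-- mod-2 absorbs an inner mod-2
lemma pvMod2 (a b : Int) :
    PySem.Int.mod (PySem.Int.mod a 2 + b) 2 = PySem.Int.mod (a + b) 2 := by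
  rw [PySem.Int.mod_eq_emod_of_pos (by norm_num), PySem.Int.mod_eq_emod_of_pos (by norm_num),
    PySem.Int.mod_eq_emod_of_pos (by norm_num)]
  omega

-- the prefix loop, characterised for an arbitrary accumulator ending in mod s 2
lemma pvFoldl (l : List Int) (acc : List Int) (s : Int)
    (hlast : PySem.List.pyGetD acc (-1) 0 = PySem.Int.mod s 2) :
    l.foldl (fun acc x => acc ++ [PySem.Int.mod (PySem.List.pyGetD acc (-1) 0 + x) 2]) acc
    = acc ++ (List.range l.length).map (fun k => PySem.Int.mod (s + (l.take (k+1)).sum) 2) := by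
  induction l generalizing acc s with
  | nil => simp
  | cons x t ih =>
    rw [List.foldl_cons, hlast, pvMod2,
      ih (acc ++ [PySem.Int.mod (s + x) 2]) (s + x)
        (PySem.List.pyGetD_neg_one_append_singleton acc _ 0)]
    rw [List.length_cons, List.range_succ_eq_map, List.map_cons, List.map_map,
      List.append_assoc]
    congr 1
    simp [Function.comp, add_assoc]

-- the prefix table is the map of pvG over 0..n
lemma pvPre_char (nums : List Int) :
    nums.foldl (fun acc x => acc ++ [PySem.Int.mod (PySem.List.pyGetD acc (-1) 0 + x) 2]) [0]
    = (List.range (nums.length + 1)).map (pvG nums) := by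
  rw [pvFoldl nums [0] 0 (by decide)]
  rw [List.range_succ_eq_map, List.map_cons, List.map_map]
  simp [pvG, Function.comp]

-- indexing the table
lemma pvGetD (nums : List Int) (k : Nat) (hk : k < nums.length + 1) :
    PySem.List.pyGetD ((List.range (nums.length + 1)).map (pvG nums)) (k : Int) 0 = pvG nums k := by
  rw [PySem.List.pyGetD_natCast]
  rw [List.getD_eq_getElem?_getD, List.getElem?_map, List.getElem?_range hk]
  rfl

-- the table-scan equals the window-any form
lemma pvB_eq_A_char (nums : List Int) :
    (List.range nums.length).any (pvWin nums) = three_odd_numbers_alt nums := by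
  simp only [three_odd_numbers_alt, pvPre_char]
  rw [PySem.List.pyRange_one]
  have h2 : ((nums.length : Int) - 2 - 0).toNat = nums.length - 2 := by omega
  rw [h2, List.any_map]
  rw [Bool.eq_iff_iff]
  simp only [List.any_eq_true, List.mem_range, Function.comp_apply, zero_add, pvWin,
    Bool.and_eq_true, decide_eq_true_eq]
  constructor
  · rintro ⟨i, hi, hlen, hodd⟩
    have hlen' : i + 3 ≤ nums.length := by
      simp only [List.length_take, List.length_drop] at hlen; omega
    refine ⟨i, by omega, ?_⟩
    have hcast : (i : Int) + 3 = ((i + 3 : Nat) : Int) := by push_cast; ring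
    rw [hcast, pvGetD nums i (by omega), pvGetD nums (i + 3) (by omega)]
    simp only [pvG]
    rw [List.take_add, List.sum_append]
    rw [PySem.Int.mod_eq_emod_of_pos (by norm_num)] at hodd ⊢
    rw [PySem.Int.mod_eq_emod_of_pos (by norm_num)]
    omega
  · rintro ⟨i, hi, hne⟩
    have hlen' : i + 3 ≤ nums.length := by omega
    refine ⟨i, by omega, ?_, ?_⟩
    · simp only [List.length_take, List.length_drop]; omega
    · have hcast : (i : Int) + 3 = ((i + 3 : Nat) : Int) := by push_cast; ring
      rw [hcast, pvGetD nums i (by omega), pvGetD nums (i + 3) (by omega)] at hne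
      simp only [pvG] at hne
      rw [List.take_add, List.sum_append] at hne
      rw [PySem.Int.mod_eq_emod_of_pos (by norm_num), PySem.Int.mod_eq_emod_of_pos (by norm_num)] at hne
      rw [PySem.Int.mod_eq_emod_of_pos (by norm_num)]
      omega

-- ===== VERDICT (by name: the statement is the Claim_ definition above) =====
theorem three_odd_numbers_spec : Claim_equal_three_odd_numbers := by
  intro nums _
  unfold Spec_three_odd_numbers
  rw [pvA_char, pvB_eq_A_char]
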